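-- pv_equiv track=rewrite | github.com/gonencbatuhan/rabbit | rabbitmodule.py | rabbiter
-- ===== SOURCE A (Python) =====
-- def rabbiter(text, char_array):
--     rabbited=''
--     for i in text:
--     	if i == " ":
--     		rabbited += "`"
--     		continue
--
--     	elif i == "`":
--     		rabbited += " "
--     		continue
--
--     	try:
--     		newind = (len(char_array) - char_array.index(i)) - 1
--     		newchar = char_array[newind]
--     	except:
--     		return "*\nan error happened with chars.\n*"
--
--     	rabbited += newchar
--
--     return rabbited
-- ===== SOURCE B (Python) =====
-- def rabbiter(text, char_array):
--     # Rewrite by character class: start from a copy of text and, for each distinct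
--     # character, overwrite all of its positions with its mirror image at once.
--     n = len(char_array)
--     out = list(text)
--     for c in set(text):
--         if c == ' ':
--             r = '`'
--         elif c == '`':
--             r = ' '
--         elif c in char_array:
--             r = char_array[n - 1 - char_array.index(c)]
--         else:
--             return "*\nan error happened with chars.\n*"
--         for j, t in enumerate(text):
--             if t == c:
--                 out[j] = r
--     return ''.join(out)
-- ===== Notes on version B (the rewrite author's own statement) =====
-- stated objective: alternative
-- what changed: B rewrites the text by character class: it iterates over the DISTINCT characters of the text, computes each one's mirror replacement once, and overwrites all positions of that character in a preallocated copy of the text, instead of A's left-to-right per-position scan that runs char_array.index for every character of the text.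
import Mathlib
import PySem

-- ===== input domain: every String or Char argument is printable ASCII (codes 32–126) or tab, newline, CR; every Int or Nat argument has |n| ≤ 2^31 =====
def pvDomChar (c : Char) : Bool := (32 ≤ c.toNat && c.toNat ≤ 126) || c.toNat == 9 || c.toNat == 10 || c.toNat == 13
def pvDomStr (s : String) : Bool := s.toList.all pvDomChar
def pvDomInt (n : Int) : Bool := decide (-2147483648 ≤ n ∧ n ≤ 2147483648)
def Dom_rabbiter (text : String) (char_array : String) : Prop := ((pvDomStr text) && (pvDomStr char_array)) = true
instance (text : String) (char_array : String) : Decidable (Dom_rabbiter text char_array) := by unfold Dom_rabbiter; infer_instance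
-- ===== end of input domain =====

-- B rewrites the text by CHARACTER CLASS: starting from a copy of the text it overwrites,
-- for each distinct character, all of that character's positions at once ('alternative' objective);
-- A scans the text left to right, looking each character up in char_array as it goes.

def pvErr : String := "*\nan error happened with chars.\n*"

-- ===== PORT A =====
def rabbiterGo (ca : List Char) : List Char → String → String
  | [], rabbited => rabbited
  | i :: rest, rabbited =>
    if i = ' ' then rabbiterGo ca rest (rabbited ++ "`")
    else if i = '`' then rabbiterGo ca rest (rabbited ++ " ")
    else
      match PySem.List.index? ca i with
      | none => pvErr  -- char_array.index(i) raised ValueError → except branch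
      | some idx =>
        match PySem.List.pyGet? ca ((ca.length : Int) - (idx : Int) - 1) with
        | none => pvErr  -- an IndexError would also land in the except branch
        | some newchar => rabbiterGo ca rest (rabbited ++ String.ofList [newchar])

def rabbiter (text : String) (char_array : String) : String :=
  rabbiterGo char_array.toList text.toList ""

-- ===== PORT B =====
-- the if/elif chain computing the replacement r for one character class
-- ('c in char_array' + '.index' are the two halves of 'match index?'; the subscript
-- n-1-idx is always in range when idx is a valid index, so pyGet? is exact here)
def pvRepl (ca : List Char) (c : Char) : Option Char :=
  if c = ' ' then some '`'
  else if c = '`' then some ' '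
  else
    match PySem.List.index? ca c with
    | none => none  -- Python: the 'else: return error' branch
    | some idx => PySem.List.pyGet? ca ((ca.length : Int) - 1 - (idx : Int))

-- inner loop: 'for j, t in enumerate(text): if t == c: out[j] = r'
def pvFill (c r : Char) : List Char → List Char → List Char
  | [], out => out
  | _ :: _, [] => []
  | t :: ts, o :: os => (if t = c then r else o) :: pvFill c r ts os

-- outer loop over the distinct characters of text
def pvClassGo (tl ca : List Char) : List Char → List Char → String
  | [], out => String.ofList out
  | c :: cs, out =>
    match pvRepl ca c with
    | none => pvErr
    | some r => pvClassGo tl ca cs (pvFill c r tl out)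

def rabbiter_alt (text : String) (char_array : String) : String :=
  pvClassGo text.toList char_array.toList (PySem.Set.ofList text.toList) text.toList

-- ===== PRECONDITION & SPEC =====
def Spec_rabbiter (text : String) (char_array : String) (out : String) : Prop := out = rabbiter_alt text char_array
instance (text : String) (char_array : String) (out : String) : Decidable (Spec_rabbiter text char_array out) := by unfold Spec_rabbiter; infer_instance

-- ===== CLAIM (what is proved, stated in full; the proofs are below) =====
def Claim_equal_rabbiter : Prop := ∀ (text : String) (char_array : String), Dom_rabbiter text char_array → Spec_rabbiter text char_array (rabbiter text char_array)

-- ===== LEMMAS AND PROOFS =====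

-- both programs agree with the pointwise description: mapM (pvRepl ca), error on the first none

lemma pvMapM_all_some (f : Char → Option Char) :
    ∀ (tl : List Char), (∀ c ∈ tl, (f c).isSome) →
      tl.mapM f = some (tl.map (fun c => (f c).getD ' '))
  | [], _ => by simp
  | c :: cs, h => by
    obtain ⟨r, hr⟩ := Option.isSome_iff_exists.mp (h c (by simp))
    have ih := pvMapM_all_some f cs (fun x hx => h x (by simp [hx]))
    simp [List.mapM_cons, hr, ih]

lemma pvMapM_none (f : Char → Option Char) :
    ∀ (tl : List Char) (c : Char), c ∈ tl → f c = none → tl.mapM f = none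
  | [], c, hc, _ => by cases hc
  | x :: xs, c, hc, hn => by
    rcases List.mem_cons.mp hc with h | h
    · subst h; simp [List.mapM_cons, hn]
    · have ih := pvMapM_none f xs c h hn
      cases hfx : f x <;> simp [List.mapM_cons, ih, hfx]

-- A's loop computes the mapM description
lemma rabbiterGo_eq (ca : List Char) :
    ∀ (tl : List Char) (acc : List Char),
      rabbiterGo ca tl (String.ofList acc) =
        match tl.mapM (pvRepl ca) with
        | some l => String.ofList (acc ++ l)
        | none => pvErr
  | [], acc => by simp [rabbiterGo]
  | i :: rest, acc => by
    simp only [rabbiterGo]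
    by_cases h1 : i = ' '
    · subst h1
      rw [if_pos rfl,
          show (String.ofList acc ++ "`") = String.ofList (acc ++ ['`']) from by
            rw [← String.ofList_append],
          rabbiterGo_eq ca rest (acc ++ ['`']), List.mapM_cons,
          show pvRepl ca ' ' = some '`' from by simp [pvRepl]]
      cases rest.mapM (pvRepl ca) <;> simp
    · rw [if_neg h1]
      by_cases h2 : i = '`'
      · subst h2
        rw [if_pos rfl,
            show (String.ofList acc ++ " ") = String.ofList (acc ++ [' ']) from by
              rw [← String.ofList_append],
            rabbiterGo_eq ca rest (acc ++ [' ']), List.mapM_cons,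
            show pvRepl ca '`' = some ' ' from by simp [pvRepl]]
        cases rest.mapM (pvRepl ca) <;> simp
      · rw [if_neg h2, List.mapM_cons]
        cases hidx : PySem.List.index? ca i with
        | none =>
          rw [show pvRepl ca i = none from by
            simp only [pvRepl, if_neg h1, if_neg h2, hidx]]
          simp
        | some idx =>
          have harith : (ca.length : Int) - (idx : Int) - 1
              = (ca.length : Int) - 1 - (idx : Int) := by ring
          rw [show pvRepl ca i = PySem.List.pyGet? ca ((ca.length : Int) - 1 - (idx : Int)) from by
            simp only [pvRepl, if_neg h1, if_neg h2, hidx]]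
          simp only [harith]
          cases hget : PySem.List.pyGet? ca ((ca.length : Int) - 1 - (idx : Int)) with
          | none => simp
          | some newchar =>
            show rabbiterGo ca rest (String.ofList acc ++ String.ofList [newchar]) = _
            rw [show (String.ofList acc ++ String.ofList [newchar])
                  = String.ofList (acc ++ [newchar]) from by rw [← String.ofList_append],
                rabbiterGo_eq ca rest (acc ++ [newchar])]
            cases rest.mapM (pvRepl ca) <;> simp

lemma pvFill_length (c r : Char) :
    ∀ (tl out : List Char), out.length = tl.length → (pvFill c r tl out).length = tl.length
  | [], out, h => by simpa [pvFill] using h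
  | t :: ts, [], h => by simp at h
  | t :: ts, o :: os, h => by
    simp only [pvFill, List.length_cons]
    rw [pvFill_length c r ts os (by simpa using h)]

lemma pvFill_getElem (c r : Char) :
    ∀ (tl out : List Char) (hlen : out.length = tl.length) (j : Nat) (hj : j < tl.length),
      (pvFill c r tl out)[j]'(by rw [pvFill_length c r tl out hlen]; exact hj) =
        if tl[j] = c then r else out[j]'(by rw [hlen]; exact hj)
  | [], out, hlen, j, hj => by simp at hj
  | t :: ts, [], hlen, j, hj => by simp at hlen
  | t :: ts, o :: os, hlen, j, hj => by
    cases j with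
    | zero => simp [pvFill]
    | succ k =>
      simp only [pvFill, List.getElem_cons_succ]
      exact pvFill_getElem c r ts os (by simpa using hlen) k (by simpa using hj)

-- B's error case
lemma pvClassGo_err (tl ca : List Char) :
    ∀ (cs out : List Char), (∃ c ∈ cs, pvRepl ca c = none) →
      pvClassGo tl ca cs out = pvErr
  | [], out, h => by simp at h
  | c0 :: cs, out, h => by
    simp only [pvClassGo]
    cases h0 : pvRepl ca c0 with
    | none => rfl
    | some r =>
      obtain ⟨c, hc, hn⟩ := h
      rcases List.mem_cons.mp hc with rfl | hmem
      · rw [h0] at hn; cases hn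
      · exact pvClassGo_err tl ca cs (pvFill c0 r tl out) ⟨c, hmem, hn⟩

-- B's success case, with the positions already finished recorded in the invariant
lemma pvClassGo_ok (tl ca : List Char) :
    ∀ (cs out : List Char) (hlen : out.length = tl.length)
      (_hsub : ∀ c ∈ cs, c ∈ tl)
      (_hall : ∀ c ∈ tl, (pvRepl ca c).isSome)
      (_hdone : ∀ (j : Nat) (hj : j < tl.length), tl[j] ∉ cs →
        out[j]'(by rw [hlen]; exact hj) = (pvRepl ca tl[j]).getD ' '),
      pvClassGo tl ca cs out = String.ofList (tl.map (fun c => (pvRepl ca c).getD ' '))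
  | [], out, hlen, _, _, hdone => by
    simp only [pvClassGo]
    congr 1
    apply List.ext_getElem (by simpa using hlen)
    intro j hj1 hj2
    simpa using hdone j (by omega) (by simp)
  | c0 :: cs, out, hlen, hsub, hall, hdone => by
    obtain ⟨r, hr⟩ := Option.isSome_iff_exists.mp (hall c0 (hsub c0 (by simp)))
    simp only [pvClassGo, hr]
    apply pvClassGo_ok tl ca cs (pvFill c0 r tl out)
      (pvFill_length c0 r tl out hlen)
      (fun c hc => hsub c (by simp [hc])) hall
    intro j hj hnot
    rw [pvFill_getElem c0 r tl out hlen j hj]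
    by_cases he : tl[j] = c0
    · rw [if_pos he, he, hr]; rfl
    · rw [if_neg he]
      exact hdone j hj (by simp [he, hnot])

-- ===== VERDICT (by name: the statement is the Claim_ definition above) =====
theorem rabbiter_spec : Claim_equal_rabbiter := by
  intro text char_array _
  show rabbiter text char_array = rabbiter_alt text char_array
  set tl := text.toList
  set ca := char_array.toList
  have hA : rabbiter text char_array =
      match tl.mapM (pvRepl ca) with
      | some l => String.ofList l
      | none => pvErr := by
    have h := rabbiterGo_eq ca tl []
    simpa [rabbiter, tl, ca] using h
  rw [hA]
  by_cases hall : ∀ c ∈ tl, (pvRepl ca c).isSome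
  · rw [pvMapM_all_some (pvRepl ca) tl hall,
        show rabbiter_alt text char_array =
            String.ofList (tl.map (fun c => (pvRepl ca c).getD ' ')) from
          pvClassGo_ok tl ca (PySem.Set.ofList tl) tl rfl
            (fun c hc => (PySem.Set.mem_ofList tl c).mp hc) hall
            (fun j hj hnot =>
              absurd ((PySem.Set.mem_ofList tl tl[j]).mpr (List.getElem_mem hj)) hnot)]
  · obtain ⟨c, hc, hn⟩ : ∃ c ∈ tl, pvRepl ca c = none := by
      by_contra hcon
      exact hall (fun c hc => by
        cases h : pvRepl ca c with
        | none => exact absurd ⟨c, hc, h⟩ hcon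
        | some r => simp)
    rw [pvMapM_none (pvRepl ca) tl c hc hn,
        show rabbiter_alt text char_array = pvErr from
          pvClassGo_err tl ca (PySem.Set.ofList tl) tl
            ⟨c, (PySem.Set.mem_ofList tl c).mpr hc, hn⟩]
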